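-- pv_equiv track=rewrite | github.com/zhangtaylor985-ai/CLIProxyAPI | scripts/session_trajectory_archive.py | summarize_vacuum_results
-- ===== SOURCE A (Python) =====
-- from typing import Any
--
-- def summarize_vacuum_results(results: list[dict[str, Any]]) -> str:
--     if not results:
--         return "skipped"
--     if all(result.get("status") == "ok" for result in results):
--         return "ok"
--     if any(result.get("status") == "timed_out" for result in results):
--         return "unknown"
--     return "failed"
-- ===== SOURCE B (Python) =====
-- def summarize_vacuum_results(results: list) -> str:
--     counts = {}
--     for result in results:
--         s = result.get("status")
--         counts[s] = counts.get(s, 0) + 1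
--     total = len(results)
--     if total == 0:
--         return "skipped"
--     if counts.get("ok", 0) == total:
--         return "ok"
--     if counts.get("timed_out", 0) > 0:
--         return "unknown"
--     return "failed"
-- ===== Notes on version B (the rewrite author's own statement) =====
-- stated objective: alternative
-- what changed: B makes one pass building a frequency table of status values and reads the verdict off the tally, replacing A's separate all/any scans.
import Mathlib
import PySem

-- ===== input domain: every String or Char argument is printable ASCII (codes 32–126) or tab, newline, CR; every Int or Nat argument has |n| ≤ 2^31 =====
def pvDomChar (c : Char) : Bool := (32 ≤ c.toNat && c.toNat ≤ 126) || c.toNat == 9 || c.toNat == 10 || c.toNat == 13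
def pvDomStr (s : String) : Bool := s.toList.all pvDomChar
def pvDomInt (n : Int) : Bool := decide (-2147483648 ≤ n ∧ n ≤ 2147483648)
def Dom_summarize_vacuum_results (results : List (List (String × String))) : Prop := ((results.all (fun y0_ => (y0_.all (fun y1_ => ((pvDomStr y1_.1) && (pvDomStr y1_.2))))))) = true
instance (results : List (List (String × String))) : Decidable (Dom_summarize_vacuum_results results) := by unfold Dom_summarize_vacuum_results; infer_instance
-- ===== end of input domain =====

-- B builds a one-pass frequency table of status values and reads the verdict off the tally,
-- instead of A's separate all/any scans (objective: alternative; same behaviour).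

-- ===== PORT A =====
def summarize_vacuum_results (results : List (List (String × String))) : String :=
  if results.isEmpty then "skipped"
  else if results.all (fun result => (PySem.Dict.mk result).get? "status" == some "ok") then "ok"
  else if results.any (fun result => (PySem.Dict.mk result).get? "status" == some "timed_out") then "unknown"
  else "failed"

-- ===== PORT B =====
def summarize_vacuum_results_alt (results : List (List (String × String))) : String :=
  let counts : PySem.Dict (Option String) Int :=
    results.foldl (fun d result =>
      let s := (PySem.Dict.mk result).get? "status"
      d.insert s (d.getD s 0 + 1)) PySem.Dict.empty
  let total : Int := (results.length : Int)
  if total = 0 then "skipped"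
  else if counts.getD (some "ok") 0 = total then "ok"
  else if counts.getD (some "timed_out") 0 > 0 then "unknown"
  else "failed"

-- ===== PRECONDITION & SPEC =====
def Spec_summarize_vacuum_results (results : List (List (String × String))) (out : String) : Prop := out = summarize_vacuum_results_alt results
instance (results : List (List (String × String))) (out : String) : Decidable (Spec_summarize_vacuum_results results out) := by unfold Spec_summarize_vacuum_results; infer_instance

-- ===== CLAIM (what is proved, stated in full; the proofs are below) =====
def Claim_equal_summarize_vacuum_results : Prop := ∀ (results : List (List (String × String))), Dom_summarize_vacuum_results results → Spec_summarize_vacuum_results results (summarize_vacuum_results results)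

-- ===== LEMMAS AND PROOFS =====

-- the tally entry for status s equals the number of results whose status is s
theorem pv_counts_getD (results : List (List (String × String))) (s : Option String) :
    (results.foldl (fun d result =>
        let v := (PySem.Dict.mk result).get? "status"
        d.insert v (d.getD v 0 + 1)) PySem.Dict.empty).getD s 0
      = ((results.map (fun result => (PySem.Dict.mk result).get? "status")).count s : Int) := by
  have hfun : (fun (d : PySem.Dict (Option String) Int) result =>
      let v := (PySem.Dict.mk result).get? "status"
      d.insert v (d.getD v 0 + 1))
    = fun d result => d.insert ((PySem.Dict.mk result).get? "status")
        (d.getD ((PySem.Dict.mk result).get? "status") 0 + 1) := rfl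
  rw [hfun, ← List.foldl_map (f := fun result => (PySem.Dict.mk result).get? "status")
        (g := fun (d : PySem.Dict (Option String) Int) v => d.insert v (d.getD v 0 + 1)),
      PySem.Dict.getD_foldl_insert_add_one]
  simp [PySem.Dict.getD_empty]

-- ===== VERDICT (by name: the statement is the Claim_ definition above) =====
theorem summarize_vacuum_results_spec : Claim_equal_summarize_vacuum_results := by
  intro results _
  unfold Spec_summarize_vacuum_results summarize_vacuum_results summarize_vacuum_results_alt
  simp only [pv_counts_getD]
  have h1 : results.isEmpty = true ↔ ((results.length : Int) = 0) := by
    simp [List.isEmpty_iff, List.length_eq_zero_iff]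
  have h2 : (results.all (fun result => (PySem.Dict.mk result).get? "status" == some "ok")) = true
      ↔ (((results.map (fun result => (PySem.Dict.mk result).get? "status")).count (some "ok") : Int)
          = (results.length : Int)) := by
    rw [List.all_eq_true]
    constructor
    · intro h
      have : (results.map (fun result => (PySem.Dict.mk result).get? "status")).count (some "ok")
          = (results.map (fun result => (PySem.Dict.mk result).get? "status")).length := by
        apply List.count_eq_length.mpr
        intro b hb
        obtain ⟨r, hr, hb'⟩ := List.mem_map.mp hb
        have := h r hr
        simp only [beq_iff_eq] at this
        rw [← hb', this]
      rw [this]; simp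
    · intro h r hr
      have hn : (results.map (fun result => (PySem.Dict.mk result).get? "status")).count (some "ok")
          = (results.map (fun result => (PySem.Dict.mk result).get? "status")).length := by
        have := h; rw [show ((results.length : Int)) = (((results.map (fun result => (PySem.Dict.mk result).get? "status")).length : Int)) by simp] at this
        exact_mod_cast this
      have := List.count_eq_length.mp hn _ (List.mem_map.mpr ⟨r, hr, rfl⟩)
      simp [← this]
  have h3 : (results.any (fun result => (PySem.Dict.mk result).get? "status" == some "timed_out")) = true
      ↔ ((0 : Int) < ((results.map (fun result => (PySem.Dict.mk result).get? "status")).count (some "timed_out") : Int)) := by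
    rw [List.any_eq_true]
    constructor
    · intro ⟨r, hr, heq⟩
      simp only [beq_iff_eq] at heq
      have : 0 < (results.map (fun result => (PySem.Dict.mk result).get? "status")).count (some "timed_out") :=
        List.count_pos_iff.mpr (List.mem_map.mpr ⟨r, hr, heq⟩)
      exact_mod_cast this
    · intro h
      have : 0 < (results.map (fun result => (PySem.Dict.mk result).get? "status")).count (some "timed_out") := by
        exact_mod_cast h
      obtain ⟨r, hr, heq⟩ := List.mem_map.mp (List.count_pos_iff.mp this)
      exact ⟨r, hr, by simp [heq]⟩
  split_ifs with g1 g2 g3 g4 g5 g6 g7 g8 g9 g10 g11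
  all_goals try first
    | rfl
    | (exfalso; simp_all [h1, h2, h3])
  all_goals (exfalso; rename_i hex; obtain ⟨r, hr, heq⟩ := hex; exact h3 r hr heq)
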